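-- pv_equiv track=rewrite | github.com/kerowam/Advent_of_Code | 2024/Day22/monkey_market_1.py | calculate_secret_number
-- ===== SOURCE A (Python) =====
-- def calculate_secret_number(number, limit):
-- 	secret_number = number
-- 	for i in range(limit):
-- 		mix_number = secret_number * 64
-- 		secret_number = secret_number ^ mix_number
-- 		if secret_number >= 16777216:
-- 			secret_number = secret_number % 16777216
-- 		mix_number = secret_number // 32
-- 		secret_number = secret_number ^ mix_number
-- 		if secret_number >= 16777216:
-- 			secret_number = secret_number % 16777216
-- 		mix_number = secret_number * 2048
-- 		secret_number = secret_number ^ mix_number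
-- 		if secret_number >= 16777216:
-- 			secret_number = secret_number % 16777216
-- 	return secret_number
-- ===== SOURCE B (Python) =====
-- M = 1 << 24
--
--
-- def _scramble(s):
--     s = (s ^ (s << 6)) % M
--     s = s ^ (s >> 5)
--     return (s ^ (s << 11)) % M
--
--
-- def _apply(cols, x):
--     r = 0
--     for c in cols:
--         if x & 1:
--             r ^= c
--         x >>= 1
--     return r
--
--
-- def _mul(p, q):
--     return [_apply(p, c) for c in q]
--
--
-- def calculate_secret_number(number, limit):
--     if limit <= 0:
--         return number
--     s = _scramble(number)                     # one step; state now in [0, 2**24)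
--     p = [_scramble(1 << j) for j in range(24)]   # GF(2) matrix of one step
--     r = [1 << j for j in range(24)]              # identity matrix
--     k = limit - 1
--     while k:
--         if k & 1:
--             r = _mul(p, r)
--         p = _mul(p, p)
--         k >>= 1
--     return _apply(r, s)
-- ===== Notes on version B (the rewrite author's own statement) =====
-- stated objective: faster
-- what changed: A iterates the 3-stage xor/shift scramble limit times; B performs one scramble to land in [0,2^24) and then, since the scramble is GF(2)-linear on 24-bit states, applies its 24x24 bit-matrix raised to the (limit-1)-th power by repeated squaring.
import Mathlib
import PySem

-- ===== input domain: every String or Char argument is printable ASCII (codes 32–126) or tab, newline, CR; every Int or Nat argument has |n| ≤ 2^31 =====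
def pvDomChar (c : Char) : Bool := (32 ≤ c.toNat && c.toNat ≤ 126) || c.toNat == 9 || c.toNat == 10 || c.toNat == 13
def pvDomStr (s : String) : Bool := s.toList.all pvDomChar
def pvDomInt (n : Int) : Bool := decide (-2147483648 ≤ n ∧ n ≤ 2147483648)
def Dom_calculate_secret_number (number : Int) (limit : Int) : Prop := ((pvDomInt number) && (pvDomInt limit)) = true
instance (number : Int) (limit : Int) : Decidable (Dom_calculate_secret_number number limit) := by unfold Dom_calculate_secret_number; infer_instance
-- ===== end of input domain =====

-- B replaces A's limit-fold of the scramble step by one scramble followed by fast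
-- exponentiation of the step's 24×24 GF(2) bit matrix (O(24² log limit) vs A's O(limit)).

-- ===== PORT A =====
def calculate_secret_number (number : Int) (limit : Int) : Int :=
  (PySem.List.pyRange 0 limit 1).foldl (fun secret_number _ =>
    let mix_number := secret_number * 64
    let s1 := PySem.Int.bxor secret_number mix_number
    let s1 := if s1 ≥ 16777216 then PySem.Int.mod s1 16777216 else s1
    let mix_number := PySem.Int.floordiv s1 32
    let s2 := PySem.Int.bxor s1 mix_number
    let s2 := if s2 ≥ 16777216 then PySem.Int.mod s2 16777216 else s2
    let mix_number := s2 * 2048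
    let s3 := PySem.Int.bxor s2 mix_number
    if s3 ≥ 16777216 then PySem.Int.mod s3 16777216 else s3) number

-- ===== PORT B =====
-- Source B: _scramble
def pvScramble (s : Int) : Int :=
  let s := PySem.Int.mod (PySem.Int.bxor s (s <<< (6 : Nat))) 16777216
  let s := PySem.Int.bxor s (s >>> (5 : Nat))
  PySem.Int.mod (PySem.Int.bxor s (s <<< (11 : Nat))) 16777216

-- Source B: _apply — r = 0; for c in cols: if x & 1: r ^= c; x >>= 1; return r
def pvApply (cols : List Int) (x : Int) : Int :=
  (cols.foldl (fun (st : Int × Int) c =>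
      (if PySem.Int.band st.2 1 ≠ 0 then PySem.Int.bxor st.1 c else st.1, st.2 >>> (1 : Nat)))
    (0, x)).1

-- Source B: _mul
def pvMul (p q : List Int) : List Int := q.map (fun c => pvApply p c)

-- Source B: the 'while k:' squaring loop.  It is only ever entered with k = limit - 1 ≥ 0,
-- where Python's 'while k:' is exactly the 'k ≤ 0' stop below (a totality guard, not a
-- change of algorithm).
def pvPowLoop (p r : List Int) (k : Int) : List Int :=
  if _h : k ≤ 0 then r
  else pvPowLoop (pvMul p p) (if PySem.Int.band k 1 ≠ 0 then pvMul p r else r) (k >>> (1 : Nat))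
termination_by k.toNat
decreasing_by
  have hk : k >>> (1 : Nat) = k / 2 := by rw [Int.shiftRight_eq_div_pow]; norm_num
  rw [hk]; omega

def calculate_secret_number_alt (number : Int) (limit : Int) : Int :=
  if limit ≤ 0 then number
  else
    let s := pvScramble number
    let p := (PySem.List.pyRange 0 24 1).map (fun (j : Int) => pvScramble ((1 : Int) <<< j.toNat))
    let r := (PySem.List.pyRange 0 24 1).map (fun (j : Int) => ((1 : Int) <<< j.toNat))
    pvApply (pvPowLoop p r (limit - 1)) s

-- ===== PRECONDITION & SPEC =====
def Spec_calculate_secret_number (number : Int) (limit : Int) (out : Int) : Prop := out = calculate_secret_number_alt number limit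
instance (number : Int) (limit : Int) (out : Int) : Decidable (Spec_calculate_secret_number number limit out) := by unfold Spec_calculate_secret_number; infer_instance

-- ===== CLAIM (what is proved, stated in full; the proofs are below) =====
def Claim_equal_calculate_secret_number : Prop := ∀ (number : Int) (limit : Int), Dom_calculate_secret_number number limit → Spec_calculate_secret_number number limit (calculate_secret_number number limit)

-- ===== LEMMAS AND PROOFS =====

-- A's loop body, named for the proofs
def stepA (secret_number : Int) : Int :=
  let mix_number := secret_number * 64
  let s1 := PySem.Int.bxor secret_number mix_number
  let s1 := if s1 ≥ 16777216 then PySem.Int.mod s1 16777216 else s1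
  let mix_number := PySem.Int.floordiv s1 32
  let s2 := PySem.Int.bxor s1 mix_number
  let s2 := if s2 ≥ 16777216 then PySem.Int.mod s2 16777216 else s2
  let mix_number := s2 * 2048
  let s3 := PySem.Int.bxor s2 mix_number
  if s3 ≥ 16777216 then PySem.Int.mod s3 16777216 else s3

theorem A_foldl (number limit : Int) :
    calculate_secret_number number limit =
      (PySem.List.pyRange 0 limit 1).foldl (fun s _ => stepA s) number := rfl

-- Nat-side mirror of the scramble, and of Source B's matrix machinery
def scrN (x : Nat) : Nat :=
  let a := (x ^^^ (x <<< 6)) % 16777216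
  let b := a ^^^ (a >>> 5)
  (b ^^^ (b <<< 11)) % 16777216

def appR : List Nat → Nat → Nat
  | [], _ => 0
  | c :: cs, x => (if x.testBit 0 then c else 0) ^^^ appR cs (x >>> 1)

def mulN (p q : List Nat) : List Nat := q.map (fun c => appR p c)

def powLoopN (p r : List Nat) (k : Nat) : List Nat :=
  if k = 0 then r
  else powLoopN (mulN p p) (if k % 2 = 1 then mulN p r else r) (k / 2)
termination_by k
decreasing_by omega

def colsFrom (f : Nat → Nat) : Nat → Nat → List Nat
  | _, 0 => []
  | j, n + 1 => f (1 <<< j) :: colsFrom f (j + 1) n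

def castL (L : List Nat) : List Int := L.map (fun (c : Nat) => (c : Int))

-- ---- the Int-level step of A equals Source B's _scramble on every int ----

theorem bxor_nonneg_same (a b : Int) (h : 0 ≤ a ↔ 0 ≤ b) : 0 ≤ PySem.Int.bxor a b := by
  unfold PySem.Int.bxor; split_ifs with h1 h2 h3 <;> simp_all

theorem bxor_lt (a b : Int) (ha0 : 0 ≤ a) (ha : a < 16777216) (hb0 : 0 ≤ b) (hb : b < 16777216) :
    PySem.Int.bxor a b < 16777216 := by
  rw [PySem.Int.bxor_of_nonneg ha0 hb0]
  have : a.toNat ^^^ b.toNat < 2 ^ 24 := Nat.xor_lt_two_pow (by omega) (by omega)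
  omega

theorem condmod (t : Int) (ht : 0 ≤ t) :
    (if t ≥ 16777216 then PySem.Int.mod t 16777216 else t) = PySem.Int.mod t 16777216 := by
  rw [PySem.Int.mod_eq_emod_of_pos (by norm_num)]
  split_ifs with h
  · rfl
  · rw [Int.emod_eq_of_lt ht (by omega)]

theorem stepA_eq (s : Int) : stepA s = pvScramble s := by
  unfold stepA pvScramble
  dsimp only
  have h64 : s <<< (6 : Nat) = s * 64 := by rw [Int.shiftLeft_eq]; norm_num
  have h1n : 0 ≤ PySem.Int.bxor s (s * 64) := bxor_nonneg_same _ _ (by constructor <;> intro <;> omega)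
  rw [h64, condmod _ h1n]
  set a := PySem.Int.mod (PySem.Int.bxor s (s * 64)) 16777216 with ha
  have ha0 : 0 ≤ a := PySem.Int.mod_nonneg _ (by norm_num)
  have haM : a < 16777216 := PySem.Int.mod_lt _ (by norm_num)
  have h32 : PySem.Int.floordiv a 32 = a >>> (5 : Nat) := by
    rw [PySem.Int.floordiv_eq_ediv_of_pos (by norm_num), Int.shiftRight_eq_div_pow]; norm_num
  rw [h32]
  set b := PySem.Int.bxor a (a >>> (5 : Nat)) with hb
  have hb0 : 0 ≤ b := bxor_nonneg_same _ _ (by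
    constructor <;> intro <;> [skip; omega]
    · rw [Int.shiftRight_eq_div_pow]; positivity)
  have hbM : b < 16777216 := by
    apply bxor_lt _ _ ha0 haM
    · rw [Int.shiftRight_eq_div_pow]; positivity
    · rw [Int.shiftRight_eq_div_pow]; norm_num; omega
  rw [if_neg (show ¬ ((16777216:Int) ≤ b) by omega)]
  have h2048 : b <<< (11 : Nat) = b * 2048 := by rw [Int.shiftLeft_eq]; norm_num
  have h3n : 0 ≤ PySem.Int.bxor b (b * 2048) := bxor_nonneg_same _ _ (by constructor <;> intro <;> omega)
  rw [h2048, condmod _ h3n]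

theorem pvScramble_nonneg (s : Int) : 0 ≤ pvScramble s := PySem.Int.mod_nonneg _ (by norm_num)
theorem pvScramble_lt (s : Int) : pvScramble s < 16777216 := PySem.Int.mod_lt _ (by norm_num)

theorem cast16 : ((16777216 : Nat) : Int) = (16777216 : Int) := by norm_num

theorem pvScramble_natCast (n : Nat) : pvScramble (n : Int) = ((scrN n : Nat) : Int) := by
  unfold pvScramble scrN
  dsimp only
  rw [← Int.natCast_shiftLeft, PySem.Int.bxor_natCast, ← cast16, PySem.Int.mod_natCast,
      ← Int.natCast_shiftRight, PySem.Int.bxor_natCast,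
      ← Int.natCast_shiftLeft, PySem.Int.bxor_natCast, PySem.Int.mod_natCast]

-- ---- the scramble is GF(2)-linear on 24-bit states ----

theorem stage_lin (k : Nat) (t u : Nat) :
    ((t ^^^ u) ^^^ (t ^^^ u) <<< k) % 2 ^ 24 = ((t ^^^ t <<< k) % 2 ^ 24) ^^^ ((u ^^^ u <<< k) % 2 ^ 24) := by
  rw [Nat.shiftLeft_xor_distrib,
    show (t ^^^ u) ^^^ (t <<< k ^^^ u <<< k) = (t ^^^ t <<< k) ^^^ (u ^^^ u <<< k) by
      simp [Nat.xor_assoc, Nat.xor_left_comm, Nat.xor_comm],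
    Nat.xor_mod_two_pow]

theorem stage2_lin (t u : Nat) :
    (t ^^^ u) ^^^ (t ^^^ u) >>> 5 = (t ^^^ t >>> 5) ^^^ (u ^^^ u >>> 5) := by
  rw [Nat.shiftRight_xor_distrib]
  simp [Nat.xor_assoc, Nat.xor_left_comm, Nat.xor_comm]

theorem scrN_linear (x y : Nat) : scrN (x ^^^ y) = scrN x ^^^ scrN y := by
  unfold scrN
  simp only [show (16777216 : Nat) = 2 ^ 24 from by norm_num]
  rw [stage_lin 6, stage2_lin, stage_lin 11]

theorem scrN_zero : scrN 0 = 0 := rfl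

theorem scrN_lt (x : Nat) : scrN x < 16777216 := Nat.mod_lt _ (by norm_num)

-- ---- properties of the matrix apply / multiply / power ----

theorem appR_zero (L : List Nat) : appR L 0 = 0 := by
  induction L with
  | nil => rfl
  | cons c cs ih => simp [appR, ih]

theorem appR_linear (L : List Nat) (x y : Nat) : appR L (x ^^^ y) = appR L x ^^^ appR L y := by
  induction L generalizing x y with
  | nil => simp [appR]
  | cons c cs ih =>
    simp only [appR, Nat.testBit_xor, Nat.shiftRight_xor_distrib, ih]
    cases hx : x.testBit 0 <;> cases hy : y.testBit 0 <;>
      simp [Nat.xor_left_comm, Nat.xor_comm]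

theorem appR_lt (L : List Nat) (x : Nat) (h : ∀ c ∈ L, c < 16777216) : appR L x < 16777216 := by
  induction L generalizing x with
  | nil => simp [appR]
  | cons c cs ih =>
    have h1 : (if x.testBit 0 then c else 0) < 16777216 := by
      split
      · exact h c (by simp)
      · norm_num
    have h2 := ih (x >>> 1) (fun d hd => h d (by simp [hd]))
    have h3 : (if x.testBit 0 then c else 0) ^^^ appR cs (x >>> 1) < 2 ^ 24 :=
      Nat.xor_lt_two_pow (by omega) (by omega)
    simpa [appR] using h3

theorem appR_mulN (p q : List Nat) (x : Nat) : appR (mulN p q) x = appR p (appR q x) := by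
  induction q generalizing x with
  | nil => simp [mulN, appR, appR_zero]
  | cons c cs ih =>
    simp only [mulN, List.map_cons, appR, appR_linear]
    rw [show appR (cs.map fun c => appR p c) (x >>> 1) = appR (mulN p cs) (x >>> 1) from rfl, ih]
    congr 1
    split <;> simp [appR_zero]

theorem bitsplit (x j n : Nat) :
    (if x.testBit 0 then 1 <<< j else 0) ^^^ (((x >>> 1) % 2 ^ n) <<< (j + 1)) =
      (x % 2 ^ (n + 1)) <<< j := by
  apply Nat.eq_of_testBit_eq
  intro i
  rcases Nat.lt_trichotomy i j with hij | hij | hij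
  · simp only [Nat.testBit_xor, Nat.testBit_shiftLeft, Nat.testBit_mod_two_pow,
      Nat.testBit_shiftRight]
    have h1 : ¬ (i ≥ j) := by omega
    have h2 : ¬ (i ≥ j + 1) := by omega
    split <;> simp [h1, h2]
  · subst hij
    simp only [Nat.testBit_xor, Nat.testBit_shiftLeft, Nat.testBit_mod_two_pow,
      Nat.testBit_shiftRight]
    have h2 : ¬ (i ≥ i + 1) := by omega
    split <;> rename_i h <;>
      simp_all [Nat.testBit_shiftLeft]
  · simp only [Nat.testBit_xor, Nat.testBit_shiftLeft, Nat.testBit_mod_two_pow,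
      Nat.testBit_shiftRight]
    have h1 : i ≥ j := by omega
    have hd : i - j ≠ 0 := by omega
    have hsplit : (if x.testBit 0 then 1 <<< j else 0).testBit i = false := by
      split
      · simp only [Nat.testBit_shiftLeft, h1, decide_true, Bool.true_and]
        rw [Bool.eq_false_iff]
        intro hc
        exact hd (Nat.testBit_one_eq_true_iff_self_eq_zero.mp hc)
      · simp
    rw [hsplit]
    have e1 : 1 + (i - (j + 1)) = i - j := by omega
    have e2 : (i - (j + 1) < n) = (i - j < n + 1) := by
      apply propext; omega
    simp [h1, show j + 1 ≤ i by omega, e1, e2]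

theorem appR_colsFrom (f : Nat → Nat) (hlin : ∀ a b, f (a ^^^ b) = f a ^^^ f b) (h0 : f 0 = 0) :
    ∀ n j x, appR (colsFrom f j n) x = f ((x % 2 ^ n) <<< j) := by
  intro n
  induction n with
  | zero => intro j x; simp [colsFrom, appR, Nat.mod_one, h0]
  | succ n ih =>
    intro j x
    rw [colsFrom, appR, ih (j + 1) (x >>> 1)]
    rw [show (if x.testBit 0 then f (1 <<< j) else 0) = f (if x.testBit 0 then 1 <<< j else 0) by
      split <;> simp [h0]]
    rw [← hlin, bitsplit]

theorem colsFrom_eq (f : Nat → Nat) :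
    ∀ n j, colsFrom f j n = (List.range n).map (fun i => f (1 <<< (j + i))) := by
  intro n
  induction n with
  | zero => intro j; rfl
  | succ n ih =>
    intro j
    rw [colsFrom, ih (j + 1), List.range_succ_eq_map, List.map_cons, List.map_map]
    simp only [Nat.add_zero]
    refine congrArg (f (1 <<< j) :: ·) ?_
    apply List.map_congr_left
    intro i _
    simp only [Function.comp_apply, Nat.succ_eq_add_one]
    rw [show j + (i + 1) = j + 1 + i from by omega]

theorem iter_two (f : Nat → Nat) (q : Nat) (x : Nat) : (f ∘ f)^[q] x = f^[2 * q] x := by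
  induction q generalizing x with
  | zero => rfl
  | succ q ih =>
    rw [Function.iterate_succ_apply, ih, show 2 * (q + 1) = 2 * q + 1 + 1 by omega,
      Function.iterate_succ_apply, Function.iterate_succ_apply]
    rfl

theorem mulN_bdd (p q : List Nat) (hp : ∀ c ∈ p, c < 16777216) :
    ∀ c ∈ mulN p q, c < 16777216 := by
  intro c hc
  simp only [mulN, List.mem_map] at hc
  obtain ⟨d, _, rfl⟩ := hc
  exact appR_lt _ _ hp

theorem powLoopN_sem (k : Nat) (p r : List Nat) (f g : Nat → Nat)
    (hp : ∀ x, x < 16777216 → appR p x = f x) (hr : ∀ x, x < 16777216 → appR r x = g x)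
    (hpb : ∀ c ∈ p, c < 16777216) (hrb : ∀ c ∈ r, c < 16777216)
    (hf : ∀ x, x < 16777216 → f x < 16777216) :
    ∀ x, x < 16777216 → appR (powLoopN p r k) x = f^[k] (g x) := by
  induction k using Nat.strong_induction_on generalizing p r f g with
  | _ k ih =>
    intro x hx
    rw [powLoopN]
    by_cases hk : k = 0
    · simp [hk, hr x hx]
    · rw [if_neg hk]
      have hp2 : ∀ y, y < 16777216 → appR (mulN p p) y = (f ∘ f) y := by
        intro y hy
        rw [appR_mulN, hp y hy, hp (f y) (hf y hy)]
        rfl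
      have hr2 : ∀ y, y < 16777216 →
          appR (if k % 2 = 1 then mulN p r else r) y = (if k % 2 = 1 then f ∘ g else g) y := by
        intro y hy
        split
        · rw [appR_mulN]
          have h1 : appR r y < 16777216 := appR_lt _ _ hrb
          have hgy : g y < 16777216 := by rw [← hr y hy]; exact h1
          rw [hr y hy, hp _ hgy]
          rfl
        · exact hr y hy
      have := ih (k / 2) (by omega) (mulN p p)
        (if k % 2 = 1 then mulN p r else r) (f ∘ f) (if k % 2 = 1 then f ∘ g else g)
        hp2 hr2 (mulN_bdd p p hpb)
        (by intro c hc; split at hc; exacts [mulN_bdd p r hpb c hc, hrb c hc])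
        (fun y hy => hf _ (hf _ hy)) x hx
      rw [this, iter_two]
      rcases Nat.mod_two_eq_zero_or_one k with hk2 | hk2
      · rw [if_neg (show ¬ (k % 2 = 1) by omega)]
        conv_rhs => rw [show k = 2 * (k / 2) by omega]
      · rw [if_pos hk2]
        conv_rhs => rw [show k = 2 * (k / 2) + 1 by omega]
        rw [Function.iterate_succ_apply]
        rfl

-- ---- cast bridges between the Int ports and the Nat mirrors ----

theorem band_one_cast (x : Nat) : PySem.Int.band (x : Int) 1 ≠ 0 ↔ x.testBit 0 := by
  rw [show (1 : Int) = ((1 : Nat) : Int) by norm_num, PySem.Int.band_natCast,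
    Nat.and_one_is_mod]
  simp [Nat.testBit_zero]
  omega

def foldStep (st : Int × Int) (c : Int) : Int × Int :=
  (if PySem.Int.band st.2 1 ≠ 0 then PySem.Int.bxor st.1 c else st.1, st.2 >>> (1 : Nat))

theorem pvApply_eq_foldStep (cols : List Int) (x : Int) :
    pvApply cols x = (cols.foldl foldStep (0, x)).1 := rfl

theorem pvApplyAux (L : List Nat) (r x : Nat) :
    ((castL L).foldl foldStep ((r : Int), (x : Int))).1 = ((r ^^^ appR L x : Nat) : Int) := by
  induction L generalizing r x with
  | nil => simp [castL, appR]
  | cons c cs ih =>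
    rw [castL, List.map_cons, List.foldl_cons]
    have hstep : foldStep ((r : Int), (x : Int)) ((c : Nat) : Int) =
        (((if x.testBit 0 then r ^^^ c else r : Nat) : Int), ((x >>> 1 : Nat) : Int)) := by
      rw [foldStep]
      by_cases hb : x.testBit 0
      · rw [if_pos ((band_one_cast x).mpr hb), if_pos hb, PySem.Int.bxor_natCast,
          Int.natCast_shiftRight]
      · rw [if_neg (fun hc => hb ((band_one_cast x).mp hc)), if_neg hb,
          Int.natCast_shiftRight]
    rw [hstep, show (List.map (fun (c : Nat) => (c : Int)) cs) = castL cs from rfl, ih]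
    rw [appR]
    by_cases hb : x.testBit 0
    · rw [if_pos hb, if_pos hb]
      congr 1
      rw [Nat.xor_assoc]
    · rw [if_neg hb, if_neg hb]
      congr 2
      simp

theorem pvApply_natCast (L : List Nat) (x : Nat) :
    pvApply (castL L) (x : Int) = ((appR L x : Nat) : Int) := by
  rw [pvApply_eq_foldStep, show ((0 : Int), (x : Int)) = (((0 : Nat) : Int), (x : Int)) by norm_num,
    pvApplyAux]
  simp

theorem pvMul_natCast (p q : List Nat) : pvMul (castL p) (castL q) = castL (mulN p q) := by
  simp only [pvMul, mulN, castL, List.map_map]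
  apply List.map_congr_left
  intro c _
  exact pvApply_natCast p c

theorem pvPowLoop_natCast (p r : List Nat) (k : Nat) :
    pvPowLoop (castL p) (castL r) (k : Int) = castL (powLoopN p r k) := by
  induction k using Nat.strong_induction_on generalizing p r with
  | _ k ih =>
    rw [pvPowLoop, powLoopN]
    by_cases hk : k = 0
    · simp [hk]
    · rw [dif_neg (show ¬ ((k : Int) ≤ 0) by omega), if_neg hk]
      have hsh : ((k : Int) >>> (1 : Nat)) = ((k / 2 : Nat) : Int) := by
        rw [← Int.natCast_shiftRight, Nat.shiftRight_one]
      have hband : (PySem.Int.band (k : Int) 1 ≠ 0) ↔ (k % 2 = 1) := by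
        rw [band_one_cast, Nat.testBit_zero]
        simp
      rw [hsh]
      rw [show (if PySem.Int.band (k : Int) 1 ≠ 0 then pvMul (castL p) (castL r) else castL r) =
          castL (if k % 2 = 1 then mulN p r else r) by
        by_cases h2 : k % 2 = 1
        · rw [if_pos (hband.mpr h2), if_pos h2, pvMul_natCast]
        · rw [if_neg (fun hc => h2 (hband.mp hc)), if_neg h2]]
      rw [pvMul_natCast]
      exact ih (k / 2) (by omega) (mulN p p) _

-- ---- glue ----

theorem foldl_iter (l : List Int) (h : Int → Int) (a : Int) :
    l.foldl (fun s _ => h s) a = h^[l.length] a := by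
  induction l generalizing a with
  | nil => rfl
  | cons c cs ih => rw [List.foldl_cons, ih, List.length_cons, Function.iterate_succ_apply]

theorem iterA (k n : Nat) : stepA^[k] ((n : Nat) : Int) = ((scrN^[k] n : Nat) : Int) := by
  induction k generalizing n with
  | zero => rfl
  | succ k ih =>
    rw [Function.iterate_succ_apply, Function.iterate_succ_apply, stepA_eq,
      pvScramble_natCast, ih]

theorem rep_scrN : ∀ x, x < 16777216 → appR (colsFrom scrN 0 24) x = scrN x := by
  intro x hx
  rw [appR_colsFrom scrN scrN_linear scrN_zero 24 0 x, Nat.shiftLeft_zero,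
    Nat.mod_eq_of_lt (by norm_num; omega)]

theorem rep_id : ∀ x, x < 16777216 → appR (colsFrom (fun y => y) 0 24) x = (fun y => y) x := by
  intro x hx
  rw [appR_colsFrom (fun y => y) (fun _ _ => rfl) rfl 24 0 x, Nat.shiftLeft_zero,
    Nat.mod_eq_of_lt (by norm_num; omega)]

theorem bdd_scrN : ∀ c ∈ colsFrom scrN 0 24, c < 16777216 := by
  rw [colsFrom_eq]
  intro c hc
  simp only [List.mem_map] at hc
  obtain ⟨i, _, rfl⟩ := hc
  exact scrN_lt _

theorem bdd_id : ∀ c ∈ colsFrom (fun y => y) 0 24, c < 16777216 := by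
  rw [colsFrom_eq]
  intro c hc
  simp only [List.mem_map, List.mem_range] at hc
  obtain ⟨i, hi, rfl⟩ := hc
  rw [Nat.shiftLeft_eq, Nat.one_mul, show (0 : Nat) + i = i from by omega,
    show (16777216 : Nat) = 2 ^ 24 from by norm_num]
  exact Nat.pow_lt_pow_right (by norm_num) (by omega)

theorem port_cols_scrN :
    (PySem.List.pyRange 0 24 1).map (fun (j : Int) => pvScramble ((1 : Int) <<< j.toNat)) =
      castL (colsFrom scrN 0 24) := by
  rw [PySem.List.pyRange_one, List.map_map, castL, colsFrom_eq]
  rw [List.map_map, show ((24 : Int) - 0).toNat = 24 from by decide]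
  apply List.map_congr_left
  intro k _
  simp only [Function.comp_apply]
  rw [show ((0 : Int) + (k : Int)).toNat = k from by omega,
    show ((1 : Int) <<< k) = (((1 <<< k : Nat) : Nat) : Int) from by
      rw [Int.natCast_shiftLeft]; norm_num,
    pvScramble_natCast, Nat.zero_add]

theorem port_cols_id :
    (PySem.List.pyRange 0 24 1).map (fun (j : Int) => ((1 : Int) <<< j.toNat)) =
      castL (colsFrom (fun y => y) 0 24) := by
  rw [PySem.List.pyRange_one, List.map_map, castL, colsFrom_eq]
  rw [List.map_map, show ((24 : Int) - 0).toNat = 24 from by decide]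
  apply List.map_congr_left
  intro k _
  simp only [Function.comp_apply]
  rw [show ((0 : Int) + (k : Int)).toNat = k from by omega,
    show ((1 : Int) <<< k) = (((1 <<< k : Nat) : Nat) : Int) from by
      rw [Int.natCast_shiftLeft]; norm_num,
    Nat.zero_add]

-- ===== VERDICT (by name: the statement is the Claim_ definition above) =====
theorem calculate_secret_number_spec : Claim_equal_calculate_secret_number := by
  unfold Claim_equal_calculate_secret_number
  intro number limit _
  unfold Spec_calculate_secret_number
  by_cases hl : limit ≤ 0
  · rw [calculate_secret_number_alt, if_pos hl, A_foldl,
      PySem.List.pyRange_one_eq_nil (by omega), List.foldl_nil]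
  · set m := limit.toNat with hmdef
    have hm1 : 1 ≤ m := by omega
    have hsn0 : 0 ≤ pvScramble number := pvScramble_nonneg number
    have hsnlt : (pvScramble number).toNat < 16777216 := by
      have := pvScramble_lt number; omega
    have hcast : pvScramble number = (((pvScramble number).toNat : Nat) : Int) := by omega
    have hA : calculate_secret_number number limit =
        ((scrN^[m - 1] ((pvScramble number).toNat) : Nat) : Int) := by
      rw [A_foldl, foldl_iter, PySem.List.length_pyRange_one,
        show (limit - 0).toNat = m from by omega,
        show m = (m - 1) + 1 from by omega, Function.iterate_succ_apply, stepA_eq, hcast, iterA]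
      simp only [Int.toNat_natCast, Nat.add_sub_cancel]
    rw [hA, calculate_secret_number_alt, if_neg hl]
    dsimp only
    rw [port_cols_scrN, port_cols_id,
      show limit - 1 = (((m - 1 : Nat)) : Int) from by omega,
      pvPowLoop_natCast, hcast, pvApply_natCast,
      powLoopN_sem (m - 1) _ _ scrN (fun y => y) rep_scrN rep_id bdd_scrN bdd_id
        (fun x _ => scrN_lt x) _ hsnlt]
    simp only [Int.toNat_natCast]
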